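-- pv_equiv track=rewrite | github.com/JerryZhuzq/leetcode | Geeksforgeek/MexWeightTransf.py | getMaxRec
-- ===== SOURCE A (Python) =====
-- def getMaxRec(string, i, n, lookup):
--     # Base Case
--     if i >= n:
--         return 0
--
--     # If this subproblem is already solved
--     if lookup[i] != -1:
--         return lookup[i]
--
--         # Don't make pair, so
--     # weight gained is 1
--     ans = 1 + getMaxRec(string, i + 1, n,
--                         lookup)
--
--     # If we can make pair
--     if i + 1 < n:
--
--         # If elements are dissimilar
--         if string[i] != string[i + 1]:
--             ans = max(4 + getMaxRec(string, i + 2,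
--                                     n, lookup), ans)
--             # if elements are similar so for
--         # making a pair we toggle any of them.
--         # Since toggle cost is 1 so
--         # overall weight gain becomes 3
--         else:
--             ans = max(3 + getMaxRec(string, i + 2,
--                                     n, lookup), ans)
--             # save and return maximum
--     # of above cases
--     lookup[i] = ans
--     return ans
-- ===== SOURCE B (Python) =====
-- def getMaxRec(string, i, n, lookup):
--     # Iterative bottom-up sweep in O(1) extra space; NOTE: unlike A, B does not
--     # mutate `lookup` (equivalence is about the return value only).
--     if i >= n:
--         return 0
--     v2 = 0  # value at k + 2
--     v1 = 0  # value at k + 1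
--     for k in range(n - 1, i - 1, -1):
--         if lookup[k] != -1:
--             vk = lookup[k]
--         else:
--             vk = 1 + v1
--             if k + 1 < n:
--                 w = 4 if string[k] != string[k + 1] else 3
--                 vk = max(vk, w + v2)
--         v2, v1 = v1, vk
--     return v1
-- ===== Notes on version B (the rewrite author's own statement) =====
-- stated objective: alternative
-- what changed: Replaced the memoized top-down recursion that mutates the lookup table with a single iterative backward sweep that keeps only the last two values (O(1) extra space, no recursion, no mutation of lookup); equivalence is about the return value only since A fills lookup in place.
-- outside the precondition, e.g. on getMaxRec('a', -3, 0, [2, -1, -1]): A returns 2, B raises IndexError; on getMaxRec('ab', 0, 2, [5]): A returns 5, B raises IndexError; on getMaxRec('ab', -1, 1, [-1, -1]): A returns 4, B returns 4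
import Mathlib
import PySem

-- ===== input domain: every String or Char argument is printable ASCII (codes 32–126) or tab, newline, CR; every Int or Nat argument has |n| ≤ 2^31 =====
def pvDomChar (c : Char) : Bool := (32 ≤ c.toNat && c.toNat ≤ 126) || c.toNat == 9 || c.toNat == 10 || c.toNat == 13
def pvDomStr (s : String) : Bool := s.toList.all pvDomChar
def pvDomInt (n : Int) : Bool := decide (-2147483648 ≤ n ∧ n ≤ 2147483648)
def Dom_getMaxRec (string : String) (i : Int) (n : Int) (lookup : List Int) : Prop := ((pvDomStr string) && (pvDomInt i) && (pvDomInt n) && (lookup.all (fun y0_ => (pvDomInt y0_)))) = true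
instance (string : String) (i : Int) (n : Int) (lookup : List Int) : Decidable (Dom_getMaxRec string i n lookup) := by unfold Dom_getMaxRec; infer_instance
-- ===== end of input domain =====

-- B replaces A's memoized recursion by an iterative backward sweep keeping only the last two
-- values (simpler, O(1) extra space); A mutates `lookup` in place, B does not — the
-- equivalence proved here is about the RETURN value only.

-- ===== PORT A =====
-- A's recursion mutates `lookup`; the port threads the list as explicit state and
-- returns (result, final lookup). `getMaxRec` is the returned value, as in Python.
def getMaxRecGo (string : String) (n : Int) (i : Int) (lookup : List Int) : Int × List Int :=
  if _h : i ≥ n then (0, lookup)                                   -- if i >= n: return 0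
  else
    let li := PySem.List.pyGetD lookup i 0                         -- lookup[i]  (in range under Pre_)
    if li ≠ -1 then (li, lookup)                                   -- if lookup[i] != -1: return lookup[i]
    else
      let p1 := getMaxRecGo string n (i + 1) lookup                -- getMaxRec(string, i+1, n, lookup)
      let ans := 1 + p1.1                                          -- ans = 1 + …
      let p2 :=
        if _h2 : i + 1 < n then                                    -- if i + 1 < n:
          if (PySem.Str.pyGet? string i).getD ' ' ≠ (PySem.Str.pyGet? string (i + 1)).getD ' ' then
            let q := getMaxRecGo string n (i + 2) p1.2             -- string[i] != string[i+1]
            (max (4 + q.1) ans, q.2)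
          else
            let q := getMaxRecGo string n (i + 2) p1.2
            (max (3 + q.1) ans, q.2)
        else (ans, p1.2)
      (p2.1, PySem.List.pySetD p2.2 i p2.1)                        -- lookup[i] = ans; return ans
termination_by (n - i).toNat
decreasing_by all_goals omega

def getMaxRec (string : String) (i : Int) (n : Int) (lookup : List Int) : Int :=
  (getMaxRecGo string n i lookup).1

-- ===== PORT B =====
-- one sweep step: state (v2, v1) = (value at k+2, value at k+1)
def altStep (string : String) (n : Int) (lookup : List Int) (st : Int × Int) (k : Int) : Int × Int :=
  let lk := PySem.List.pyGetD lookup k 0                           -- lookup[k]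
  let vk :=
    if lk ≠ -1 then lk
    else
      let s := 1 + st.2                                            -- vk = 1 + v1
      if k + 1 < n then
        let w : Int := if (PySem.Str.pyGet? string k).getD ' ' ≠ (PySem.Str.pyGet? string (k + 1)).getD ' ' then 4 else 3
        max s (w + st.1)                                           -- vk = max(vk, w + v2)
      else s
  (st.2, vk)                                                       -- v2, v1 = v1, vk

def getMaxRec_alt (string : String) (i : Int) (n : Int) (lookup : List Int) : Int :=
  if i ≥ n then 0
  else ((PySem.List.pyRange (n - 1) (i - 1) (-1)).foldl (altStep string n lookup) (0, 0)).2

-- ===== PRECONDITION & SPEC =====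
-- Pre_ keeps the natural domain 0 ≤ i with the string and memo table at least n long (plus the
-- trivial i ≥ n calls, which touch nothing): outside it A raises IndexError, or returns a value
-- produced by Python's negative-index wraparound into the memo/string, where B may raise instead.
def Pre_getMaxRec (string : String) (i : Int) (n : Int) (lookup : List Int) : Prop :=
  n ≤ i ∨ (0 ≤ i ∧ n ≤ (string.toList.length : Int) ∧ n ≤ (lookup.length : Int))
instance (string : String) (i : Int) (n : Int) (lookup : List Int) : Decidable (Pre_getMaxRec string i n lookup) := by unfold Pre_getMaxRec; infer_instance

def pvWitness_getMaxRec : String × Int × Int × List Int := ("abab", 0, 4, [-1, -1, -1, -1])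

def Spec_getMaxRec (string : String) (i : Int) (n : Int) (lookup : List Int) (out : Int) : Prop := out = getMaxRec_alt string i n lookup
instance (string : String) (i : Int) (n : Int) (lookup : List Int) (out : Int) : Decidable (Spec_getMaxRec string i n lookup out) := by unfold Spec_getMaxRec; infer_instance

-- ===== CLAIM (what is proved, stated in full; the proofs are below) =====
def Claim_equal_getMaxRec : Prop := ∀ (string : String) (i : Int) (n : Int) (lookup : List Int), Dom_getMaxRec string i n lookup → Pre_getMaxRec string i n lookup → Spec_getMaxRec string i n lookup (getMaxRec string i n lookup)

-- ===== LEMMAS AND PROOFS =====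

-- the pure value function both ports compute: memo entries of the ORIGINAL lookup are read,
-- unfilled ones are given by A's recurrence
def specV (string : String) (n : Int) (lookup : List Int) (i : Int) : Int :=
  if _h : i ≥ n then 0
  else
    let li := PySem.List.pyGetD lookup i 0
    if li ≠ -1 then li
    else
      let ans := 1 + specV string n lookup (i + 1)
      if _h2 : i + 1 < n then
        if (PySem.Str.pyGet? string i).getD ' ' ≠ (PySem.Str.pyGet? string (i + 1)).getD ' ' then
          max (4 + specV string n lookup (i + 2)) ans
        else
          max (3 + specV string n lookup (i + 2)) ans
      else ans
termination_by (n - i).toNat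
decreasing_by all_goals omega

-- invariant on A's mutated list: each cell (below n) holds its original value or its specV value
def GoodL (string : String) (n : Int) (lookup0 lk : List Int) : Prop :=
  lk.length = lookup0.length ∧
  ∀ j : Int, 0 ≤ j → j < n →
    PySem.List.pyGetD lk j 0 = PySem.List.pyGetD lookup0 j 0 ∨
    PySem.List.pyGetD lk j 0 = specV string n lookup0 j

lemma good_set (string : String) (n : Int) (lookup0 lk : List Int) (i v : Int)
    (hl : n ≤ (lookup0.length : Int))
    (hG : GoodL string n lookup0 lk) (hi : 0 ≤ i) (hin : i < n)
    (hv : v = specV string n lookup0 i) :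
    GoodL string n lookup0 (PySem.List.pySetD lk i v) := by
  obtain ⟨hlen, hmem⟩ := hG
  constructor
  · rw [PySem.List.pySetD_of_nonneg lk v hi, List.length_set, hlen]
  · intro j hj0 hjn
    have hjlen : j < (lk.length : Int) := by omega
    rw [PySem.List.pySetD_of_nonneg lk v hi,
      PySem.List.pyGetD_eq_getElem _ 0 hj0 (by rw [List.length_set]; exact_mod_cast hjlen)]
    rw [List.getElem_set]
    by_cases hij : i.toNat = j.toNat
    · have : j = i := by omega
      subst this
      simp only [if_true]
      exact Or.inr hv
    · rw [if_neg hij, ← PySem.List.pyGetD_eq_getElem lk 0 hj0 (by exact_mod_cast hjlen)]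
      exact hmem j hj0 hjn

lemma goA (string : String) (n : Int) (lookup0 : List Int)
    (_hs : n ≤ (string.toList.length : Int)) (hl : n ≤ (lookup0.length : Int)) :
    ∀ (m : Nat) (i : Int) (lk : List Int), (n - i).toNat ≤ m → 0 ≤ i →
      GoodL string n lookup0 lk →
      (getMaxRecGo string n i lk).1 = specV string n lookup0 i ∧
      GoodL string n lookup0 (getMaxRecGo string n i lk).2 := by
  intro m
  induction m with
  | zero =>
    intro i lk hm h0 hG
    have hin : i ≥ n := by omega
    rw [getMaxRecGo, dif_pos hin]
    exact ⟨by rw [specV, dif_pos hin], hG⟩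
  | succ m IH =>
    intro i lk hm h0 hG
    by_cases hin : i ≥ n
    · rw [getMaxRecGo, dif_pos hin]
      exact ⟨by rw [specV, dif_pos hin], hG⟩
    by_cases hr : PySem.List.pyGetD lk i 0 = -1
    case neg =>
      -- memo hit: A returns lk[i] unchanged
      have hgo : getMaxRecGo string n i lk = (PySem.List.pyGetD lk i 0, lk) := by
        rw [getMaxRecGo, dif_neg hin]
        simp only [ne_eq, hr, not_false_eq_true, if_true]
      rw [hgo]
      refine ⟨?_, hG⟩
      rcases hG.2 i h0 (by omega) with h | h
      · rw [h, specV, dif_neg hin, if_pos (by rw [← h]; exact hr)]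
      · exact h
    case pos =>
      -- memo miss: lookup0[i] must be -1 as well (else specV i = lookup0[i] ≠ -1 = lk[i] = specV i)
      have hl0 : PySem.List.pyGetD lookup0 i 0 = -1 := by
        rcases hG.2 i h0 (by omega) with h | h
        · rw [← h]; exact hr
        · by_contra hne
          have hsp : specV string n lookup0 i = PySem.List.pyGetD lookup0 i 0 := by
            rw [specV, dif_neg hin, if_pos hne]
          rw [h, hsp] at hr
          exact hne hr
      have hP1 := IH (i + 1) lk (by omega) (by omega) hG
      have hVi : specV string n lookup0 i =
          (if _h2 : i + 1 < n then
            if (PySem.Str.pyGet? string i).getD ' ' ≠ (PySem.Str.pyGet? string (i + 1)).getD ' ' then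
              max (4 + specV string n lookup0 (i + 2)) (1 + specV string n lookup0 (i + 1))
            else max (3 + specV string n lookup0 (i + 2)) (1 + specV string n lookup0 (i + 1))
          else 1 + specV string n lookup0 (i + 1)) := by
        rw [specV, dif_neg hin]
        simp only [ne_eq, hl0, not_true_eq_false, if_false]
      by_cases h2 : i + 1 < n
      · have hQ := IH (i + 2) (getMaxRecGo string n (i + 1) lk).2 (by omega) (by omega) hP1.2
        by_cases hc : (PySem.Str.pyGet? string i).getD ' ' ≠ (PySem.Str.pyGet? string (i + 1)).getD ' '
        · have hgo : getMaxRecGo string n i lk =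
              (max (4 + (getMaxRecGo string n (i + 2) (getMaxRecGo string n (i + 1) lk).2).1)
                   (1 + (getMaxRecGo string n (i + 1) lk).1),
               PySem.List.pySetD (getMaxRecGo string n (i + 2) (getMaxRecGo string n (i + 1) lk).2).2 i
                 (max (4 + (getMaxRecGo string n (i + 2) (getMaxRecGo string n (i + 1) lk).2).1)
                      (1 + (getMaxRecGo string n (i + 1) lk).1))) := by
            rw [getMaxRecGo, dif_neg hin]
            simp only [ne_eq, hr, not_true_eq_false, if_false, dif_pos h2, if_pos hc]
          rw [hgo]
          have hv : max (4 + (getMaxRecGo string n (i + 2) (getMaxRecGo string n (i + 1) lk).2).1)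
              (1 + (getMaxRecGo string n (i + 1) lk).1) = specV string n lookup0 i := by
            rw [hP1.1, hQ.1, hVi, dif_pos h2, if_pos hc]
          exact ⟨hv, good_set string n lookup0 _ i _ hl hQ.2 h0 (by omega) hv⟩
        · have hgo : getMaxRecGo string n i lk =
              (max (3 + (getMaxRecGo string n (i + 2) (getMaxRecGo string n (i + 1) lk).2).1)
                   (1 + (getMaxRecGo string n (i + 1) lk).1),
               PySem.List.pySetD (getMaxRecGo string n (i + 2) (getMaxRecGo string n (i + 1) lk).2).2 i
                 (max (3 + (getMaxRecGo string n (i + 2) (getMaxRecGo string n (i + 1) lk).2).1)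
                      (1 + (getMaxRecGo string n (i + 1) lk).1))) := by
            rw [getMaxRecGo, dif_neg hin]
            simp only [ne_eq, hr, not_true_eq_false, if_false, dif_pos h2, if_neg hc]
          rw [hgo]
          have hv : max (3 + (getMaxRecGo string n (i + 2) (getMaxRecGo string n (i + 1) lk).2).1)
              (1 + (getMaxRecGo string n (i + 1) lk).1) = specV string n lookup0 i := by
            rw [hP1.1, hQ.1, hVi, dif_pos h2, if_neg hc]
          exact ⟨hv, good_set string n lookup0 _ i _ hl hQ.2 h0 (by omega) hv⟩
      · have hgo : getMaxRecGo string n i lk =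
            (1 + (getMaxRecGo string n (i + 1) lk).1,
             PySem.List.pySetD (getMaxRecGo string n (i + 1) lk).2 i
               (1 + (getMaxRecGo string n (i + 1) lk).1)) := by
          rw [getMaxRecGo, dif_neg hin]
          simp only [ne_eq, hr, not_true_eq_false, if_false, dif_neg h2]
        rw [hgo]
        have hv : 1 + (getMaxRecGo string n (i + 1) lk).1 = specV string n lookup0 i := by
          rw [hP1.1, hVi, dif_neg h2]
        exact ⟨hv, good_set string n lookup0 _ i _ hl hP1.2 h0 (by omega) hv⟩

lemma altStep_correct (string : String) (n : Int) (lookup : List Int)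
    (k : Int) (hkn : k < n) :
    altStep string n lookup (specV string n lookup (k + 2), specV string n lookup (k + 1)) k
      = (specV string n lookup (k + 1), specV string n lookup k) := by
  have h1 : ¬ k ≥ n := by omega
  have hV : specV string n lookup k =
      (let li := PySem.List.pyGetD lookup k 0
       if li ≠ -1 then li
       else
         let ans := 1 + specV string n lookup (k + 1)
         if _h2 : k + 1 < n then
           if (PySem.Str.pyGet? string k).getD ' ' ≠ (PySem.Str.pyGet? string (k + 1)).getD ' ' then
             max (4 + specV string n lookup (k + 2)) ans
           else max (3 + specV string n lookup (k + 2)) ans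
         else ans) := by
    rw [specV]; rw [dif_neg h1]
  rw [hV]
  simp only [altStep]
  split_ifs <;> simp [max_comm]

lemma altSeg (string : String) (n : Int) (lookup : List Int) :
    ∀ (m : Nat) (a i : Int), (a + 1 - i).toNat ≤ m → i ≤ a + 1 → a < n →
      (PySem.List.pyRange a (i - 1) (-1)).foldl (altStep string n lookup)
          (specV string n lookup (a + 2), specV string n lookup (a + 1))
        = (specV string n lookup (i + 1), specV string n lookup i) := by
  intro m
  induction m with
  | zero =>
    intro a i hm hia _han
    have hi : i = a + 1 := by omega
    subst hi
    rw [PySem.List.pyRange_neg_one_eq_nil (by omega), show a + 1 + 1 = a + 2 by ring]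
    rfl
  | succ m IH =>
    intro a i hm hia han
    by_cases hcase : i = a + 1
    · subst hcase
      rw [PySem.List.pyRange_neg_one_eq_nil (by omega), show a + 1 + 1 = a + 2 by ring]
      rfl
    · rw [PySem.List.pyRange_neg_one_cons (by omega : i - 1 < a), List.foldl_cons,
        altStep_correct string n lookup a han]
      have := IH (a - 1) i (by omega) (by omega) (by omega)
      rw [show a - 1 + 2 = a + 1 by ring, show a - 1 + 1 = a by ring] at this
      exact this

-- ===== VERDICT (by name: the statement is the Claim_ definition above) =====
theorem getMaxRec_spec : Claim_equal_getMaxRec := by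
  intro string i n lookup _hdom hpre
  unfold Spec_getMaxRec
  by_cases hin : i ≥ n
  · rw [getMaxRec, getMaxRecGo, dif_pos hin, getMaxRec_alt, if_pos hin]
  · obtain h | ⟨h0, hs, hl⟩ := hpre
    · omega
    · have hA := goA string n lookup hs hl ((n - i).toNat) i lookup le_rfl h0
        ⟨rfl, fun j _ _ => Or.inl rfl⟩
      rw [getMaxRec, hA.1, getMaxRec_alt, if_neg hin]
      have h2 : specV string n lookup (n + 1) = 0 := by rw [specV, dif_pos (by omega)]
      have h3 : specV string n lookup n = 0 := by rw [specV, dif_pos le_rfl]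
      have hseg := altSeg string n lookup ((n - i).toNat) (n - 1) i (by omega) (by omega) (by omega)
      rw [show n - 1 + 2 = n + 1 by ring, show n - 1 + 1 = n by ring, h2, h3] at hseg
      rw [hseg]
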